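-- pv_equiv track=rewrite | github.com/roeibenzion/Google-Foobar | assignment6.py | solution
-- ===== SOURCE A (Python) =====
-- def compare_large_numbers(s, t):
--     # Compare the lengths of the numbers first
--     if len(s) < len(t):
--         return -1
--     elif len(s) > len(t):
--         return 1
--
--     # If lengths are equal, compare the numbers character by character
--     for i in range(len(s)):
--         if s[i] < t[i]:
--             return -1
--         elif s[i] > t[i]:
--             return 1
--
--     return 0  # Numbers are equal
--
-- def solution(M, F):
--     #The observation is that the numbers has to be coprime.
--     #If they are not, after backward cycles we'll get to M=F, there is no solution from there.
--     #Thus we run the Euclidean algorithm, and count how many steps.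
--     count = -1
--     comp = compare_large_numbers(M, F)
--     if comp == -1:
--         M, F = F, M
--     while F != '0':
--         count += int(M)//int(F)
--         M, F = F, str(int(M)%(int(F)))
--     if M == '1':
--         return str(count)
--     return 'impossible'
-- ===== SOURCE B (Python) =====
-- def solution(M, F):
--     # Tail-recursive Euclidean step counter: no initial string comparison/swap
--     # (a zero quotient performs the swap), terminal test folded into the helper.
--     def go(m, f, count):
--         if f == '0':
--             return str(count) if m == '1' else 'impossible'
--         mi, fi = int(m), int(f)
--         return go(f, str(mi % fi), count + mi // fi)
--     return go(M, F, -1)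
-- ===== Notes on version B (the rewrite author's own statement) =====
-- stated objective: simpler
-- what changed: Drops the big-number string comparison helper and the initial swap (a zero first quotient makes them redundant) and replaces the while loop plus trailing check by one tail-recursive helper with the terminal test folded in, keeping the lazy string-to-int conversion.
-- outside the precondition, e.g. on solution('1', '01'): A returns '0', B returns 'impossible'; on solution(' 1', '22'): A returns 'impossible', B returns '21'; on solution('0', '0a'): A returns 'impossible', B raises ValueError
import Mathlib
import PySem

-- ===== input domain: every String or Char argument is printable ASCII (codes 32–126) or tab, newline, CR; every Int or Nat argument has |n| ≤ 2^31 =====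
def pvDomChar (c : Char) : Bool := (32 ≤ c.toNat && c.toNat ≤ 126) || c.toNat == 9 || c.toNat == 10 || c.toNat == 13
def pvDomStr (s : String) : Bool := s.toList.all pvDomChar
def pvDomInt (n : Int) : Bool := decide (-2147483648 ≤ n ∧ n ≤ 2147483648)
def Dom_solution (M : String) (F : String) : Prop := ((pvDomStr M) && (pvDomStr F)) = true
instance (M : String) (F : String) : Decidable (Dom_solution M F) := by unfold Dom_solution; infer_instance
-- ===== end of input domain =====

-- B replaces A's string-comparison swap + while loop by a tail-recursive helper with the
-- terminal test folded in (a zero quotient performs the swap); return value only, no mutation.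

-- pvMu F = |int(F)| (0 if unparseable): the quantity Python's loop shrinks every iteration.
-- Both loop ports use it as a totality gadget: a structural fuel argument (seeded with more
-- fuel than iterations can occur) plus a shrink guard; neither the fuel-out branch nor a
-- false guard is reachable on a real run, where str(m % f) parses back smaller than f.
def pvMu (s : String) : Nat := ((PySem.Int.ofStr? s).getD 0).natAbs

-- ===== PORT A =====
-- the character loop of compare_large_numbers (early return -1/1, else falls through to 0)
def cmpChars : List Char → List Char → Int
  | c :: cs, d :: ds => if c < d then -1 else if d < c then 1 else cmpChars cs ds
  | _, _ => 0

def compareLargeNumbers (s t : String) : Int :=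
  if s.toList.length < t.toList.length then -1
  else if t.toList.length < s.toList.length then 1
  else cmpChars s.toList t.toList

-- the while loop; none = Python raises (ValueError / ZeroDivisionError); fuel-out and
-- failed-guard branches are unreachable on real runs (see pvMu above)
def solutionLoop : Nat → String → String → Int → Option (String × Int)
  | 0, _, _, _ => none
  | fuel + 1, M, F, count =>
    if F = "0" then some (M, count)
    else
      match PySem.Int.ofStr? M, PySem.Int.ofStr? F with
      | some m, some f =>
        if f = 0 then none
        else if pvMu (PySem.Int.toStr (PySem.Int.mod m f)) < pvMu F then
          solutionLoop fuel F (PySem.Int.toStr (PySem.Int.mod m f)) (count + PySem.Int.floordiv m f)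
        else none
      | _, _ => none

def solution (M : String) (F : String) : String :=
  let p := if compareLargeNumbers M F = -1 then (F, M) else (M, F)
  match solutionLoop (pvMu M + pvMu F + 1) p.1 p.2 (-1) with
  | some (m, c) => if m = "1" then PySem.Int.toStr c else "impossible"
  | none => "impossible"

-- ===== PORT B =====
-- go(m, f, count); "impossible" in the fi = 0 / unparseable / fuel-out / failed-guard
-- branches is junk: Python B raises there (all outside Pre_ / unreachable on real runs)
def solutionGo : Nat → String → String → Int → String
  | 0, _, _, _ => "impossible"
  | fuel + 1, m, f, count =>
    if f = "0" then (if m = "1" then PySem.Int.toStr count else "impossible")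
    else
      match PySem.Int.ofStr? m, PySem.Int.ofStr? f with
      | some mi, some fi =>
        if fi = 0 then "impossible"
        else if pvMu (PySem.Int.toStr (PySem.Int.mod mi fi)) < pvMu f then
          solutionGo fuel f (PySem.Int.toStr (PySem.Int.mod mi fi)) (count + PySem.Int.floordiv mi fi)
        else "impossible"
      | _, _ => "impossible"

def solution_alt (M : String) (F : String) : String :=
  solutionGo (pvMu M + pvMu F + 1) M F (-1)

-- ===== PRECONDITION & SPEC =====
-- pvLexLt = "A's compare_large_numbers returns -1" as a closed-form order on the inputs:
-- shorter first, then pointwise character order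
def pvCharLt : List Char → List Char → Bool
  | c :: cs, d :: ds => c < d || (c = d && pvCharLt cs ds)
  | _, _ => false

def pvLexLt (s t : List Char) : Bool :=
  if s.length < t.length then true
  else if t.length < s.length then false
  else pvCharLt s t

-- Pre_ excludes (a) inputs where Python A raises (unparseable numerals, or int(F) = 0 with
-- F ≠ '0'), and (b) inputs where A's lexicographic comparison says M < F yet the numerically
-- smaller of the two is not a canonical non-negative decimal numeral (signs, whitespace,
-- leading zeros, negatives, or equal values under different spellings): there A's swap and
-- final '1'-test act on accidental string forms and both A's and B's answers are defensible
-- readings of an unspecified input format.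
def Pre_solution (M : String) (F : String) : Prop :=
  (pvLexLt M.toList F.toList = false ∧
    (F = "0" ∨ ((PySem.Int.ofStr? M).isSome ∧ (PySem.Int.ofStr? F).getD 0 ≠ 0)))
  ∨ ((PySem.Int.ofStr? M).isSome ∧ 0 ≤ (PySem.Int.ofStr? M).getD 0 ∧
      0 < (PySem.Int.ofStr? F).getD 0 ∧
      ((PySem.Int.ofStr? M).getD 0 < (PySem.Int.ofStr? F).getD 0 →
        PySem.Int.toStr ((PySem.Int.ofStr? M).getD 0) = M) ∧
      ((PySem.Int.ofStr? F).getD 0 < (PySem.Int.ofStr? M).getD 0 →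
        PySem.Int.toStr ((PySem.Int.ofStr? F).getD 0) = F) ∧
      ((PySem.Int.ofStr? M).getD 0 = (PySem.Int.ofStr? F).getD 0 → M = F))

instance (M : String) (F : String) : Decidable (Pre_solution M F) := by
  unfold Pre_solution; infer_instance

def pvWitness_solution : String × String := ("5", "3")

def Spec_solution (M : String) (F : String) (out : String) : Prop := out = solution_alt M F
instance (M : String) (F : String) (out : String) : Decidable (Spec_solution M F out) := by
  unfold Spec_solution; infer_instance

-- ===== CLAIM (what is proved, stated in full; the proofs are below) =====
def Claim_equal_solution : Prop := ∀ (M : String) (F : String), Dom_solution M F → Pre_solution M F → Spec_solution M F (solution M F)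

-- ===== LEMMAS AND PROOFS =====

-- A's finishing step applied to the loop result equals B's helper at the same fuel, for ALL
-- inputs: the two recursions take literally the same guarded steps.
theorem loop_finish_eq_go (n : Nat) (M F : String) (c : Int) :
    (match solutionLoop n M F c with
      | some (m, k) => if m = "1" then PySem.Int.toStr k else "impossible"
      | none => "impossible") = solutionGo n M F c := by
  induction n generalizing M F c with
  | zero => rfl
  | succ k ih =>
    rw [solutionLoop, solutionGo]
    by_cases h0 : F = "0"
    · simp [h0]
    · rw [if_neg h0, if_neg h0]
      cases hM : PySem.Int.ofStr? M with
      | none => cases hF : PySem.Int.ofStr? F <;> rfl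
      | some m =>
        cases hF : PySem.Int.ofStr? F with
        | none => rfl
        | some f =>
          dsimp only
          by_cases hf : f = 0
          · simp [hf]
          · rw [if_neg hf, if_neg hf]
            by_cases hg : pvMu (PySem.Int.toStr (PySem.Int.mod m f)) < pvMu F
            · rw [if_pos hg, if_pos hg]; exact ih _ _ _
            · rw [if_neg hg, if_neg hg]

-- B's helper does not depend on the fuel as long as the fuel exceeds pvMu of the divisor
-- (the guard keeps that invariant along the recursion)
theorem go_stable (n₁ : Nat) : ∀ (n₂ : Nat) (M F : String) (c : Int),
    pvMu F < n₁ → pvMu F < n₂ → solutionGo n₁ M F c = solutionGo n₂ M F c := by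
  induction n₁ with
  | zero => intro n₂ M F c h1; omega
  | succ a ih =>
    intro n₂ M F c h1 h2
    cases n₂ with
    | zero => omega
    | succ b =>
      rw [solutionGo, solutionGo]
      by_cases h0 : F = "0"
      · simp [h0]
      · rw [if_neg h0, if_neg h0]
        cases hM : PySem.Int.ofStr? M with
        | none => cases hF : PySem.Int.ofStr? F <;> rfl
        | some m =>
          cases hF : PySem.Int.ofStr? F with
          | none => rfl
          | some f =>
            dsimp only
            by_cases hf : f = 0
            · simp [hf]
            · rw [if_neg hf, if_neg hf]
              by_cases hg : pvMu (PySem.Int.toStr (PySem.Int.mod m f)) < pvMu F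
              · rw [if_pos hg, if_pos hg]
                exact ih b F _ _ (by omega) (by omega)
              · rw [if_neg hg, if_neg hg]

-- A's character scan returns -1 only when pvCharLt holds
theorem cmpChars_neg (s t : List Char) (h : cmpChars s t = -1) : pvCharLt s t = true := by
  induction s generalizing t with
  | nil => simp [cmpChars] at h
  | cons c cs ih =>
    cases t with
    | nil => simp [cmpChars] at h
    | cons d ds =>
      rw [cmpChars] at h
      rw [pvCharLt]
      by_cases h1 : c < d
      · simp [h1]
      · rw [if_neg h1] at h
        by_cases h2 : d < c
        · rw [if_pos h2] at h; simp at h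
        · rw [if_neg h2] at h
          have : c = d := le_antisymm (not_lt.mp h2) (not_lt.mp h1)
          simp [this, ih ds h]

theorem compare_ne_neg_of_lex_false (M F : String)
    (h : pvLexLt M.toList F.toList = false) : compareLargeNumbers M F ≠ -1 := by
  unfold pvLexLt at h
  unfold compareLargeNumbers
  split_ifs at h ⊢ with h1 h2
  all_goals first
    | (intro hc; rw [cmpChars_neg _ _ hc] at h; exact Bool.true_eq_false.mp h)
    | decide

-- one zero-quotient step of B's helper on canonical numerals with values a < b
theorem go_step_lt (n : Nat) (A B : String) (c : Int) (a b : Int)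
    (hA : PySem.Int.ofStr? A = some a) (hB : PySem.Int.ofStr? B = some b)
    (hTA : PySem.Int.toStr a = A)
    (ha : 0 ≤ a) (hab : a < b) (hB0 : B ≠ "0") :
    solutionGo (n + 1) A B c = solutionGo n B A c := by
  have hb0 : b ≠ 0 := by omega
  have hmod : PySem.Int.mod a b = a := by
    rw [PySem.Int.mod_eq_emod_of_pos (by omega)]
    exact Int.emod_eq_of_lt ha hab
  have hdiv : PySem.Int.floordiv a b = 0 := by
    rw [PySem.Int.floordiv_eq_ediv_of_pos (by omega)]
    exact Int.ediv_eq_zero_of_lt ha hab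
  have hguard : pvMu A < pvMu B := by simp [pvMu, hA, hB]; omega
  rw [solutionGo, if_neg hB0]
  simp only [hA, hB]
  rw [if_neg hb0, hmod, hTA, if_pos hguard, hdiv, add_zero]

-- the initial swap is invisible to B's helper at sufficient fuel, whenever the numerically
-- smaller argument is a canonical numeral (equal values: equal strings)
theorem go_swap (n : Nat) (M F : String) (c : Int)
    (hMs : (PySem.Int.ofStr? M).isSome) (hMnn : 0 ≤ (PySem.Int.ofStr? M).getD 0)
    (hfpos : 0 < (PySem.Int.ofStr? F).getD 0)
    (hlt : (PySem.Int.ofStr? M).getD 0 < (PySem.Int.ofStr? F).getD 0 →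
      PySem.Int.toStr ((PySem.Int.ofStr? M).getD 0) = M)
    (hgt : (PySem.Int.ofStr? F).getD 0 < (PySem.Int.ofStr? M).getD 0 →
      PySem.Int.toStr ((PySem.Int.ofStr? F).getD 0) = F)
    (heq : (PySem.Int.ofStr? M).getD 0 = (PySem.Int.ofStr? F).getD 0 → M = F)
    (hnM : pvMu M < n) (hnF : pvMu F < n) :
    solutionGo n F M c = solutionGo n M F c := by
  have hMsome : PySem.Int.ofStr? M = some ((PySem.Int.ofStr? M).getD 0) := by
    cases h : PySem.Int.ofStr? M with
    | none => rw [h] at hMs; simp at hMs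
    | some v => simp
  have hFsome : PySem.Int.ofStr? F = some ((PySem.Int.ofStr? F).getD 0) := by
    cases h : PySem.Int.ofStr? F with
    | none => rw [h] at hfpos; simp at hfpos
    | some v => simp
  have hF0 : F ≠ "0" := by
    intro he
    have hz : (PySem.Int.ofStr? F).getD 0 = 0 := by rw [he]; decide
    omega
  have hmuM : pvMu M = ((PySem.Int.ofStr? M).getD 0).natAbs := rfl
  have hmuF : pvMu F = ((PySem.Int.ofStr? F).getD 0).natAbs := rfl
  cases n with
  | zero => omega
  | succ k =>
    rcases lt_trichotomy ((PySem.Int.ofStr? M).getD 0) ((PySem.Int.ofStr? F).getD 0) with h | h | h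
    · rw [go_step_lt k M F c _ _ hMsome hFsome (hlt h) hMnn h hF0]
      exact go_stable (k + 1) k F M c (by omega) (by omega)
    · rw [heq h]
    · have hM0 : M ≠ "0" := by
        intro he
        have hz : (PySem.Int.ofStr? M).getD 0 = 0 := by rw [he]; decide
        omega
      rw [go_step_lt k F M c _ _ hFsome hMsome (hgt h) (le_of_lt hfpos) h hM0]
      exact go_stable k (k + 1) M F c (by omega) (by omega)

-- ===== VERDICT (by name: the statement is the Claim_ definition above) =====
theorem solution_spec : Claim_equal_solution := by
  intro M F _hD hPre
  unfold Spec_solution solution solution_alt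
  rcases hPre with ⟨hlex, _⟩ | ⟨hMs, hMnn, hfpos, hlt, hgt, heq⟩
  · rw [if_neg (compare_ne_neg_of_lex_false M F hlex)]
    exact loop_finish_eq_go (pvMu M + pvMu F + 1) M F (-1)
  · by_cases hc : compareLargeNumbers M F = -1
    · rw [if_pos hc]
      exact (loop_finish_eq_go (pvMu M + pvMu F + 1) F M (-1)).trans
        (go_swap (pvMu M + pvMu F + 1) M F (-1) hMs hMnn hfpos hlt hgt heq (by omega) (by omega))
    · rw [if_neg hc]
      exact loop_finish_eq_go (pvMu M + pvMu F + 1) M F (-1)
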